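-- pv_equiv track=rewrite | github.com/bsc-wdc/compss | tests/sources/local/tools/0_tracing_basic_python/events_checker.py | __accumulate_events__
-- ===== SOURCE A (Python) =====
-- def __accumulate_events__(trace_events, events):
--     """
--     Accumulates the trace events. Calculates the amount of appearances.
--
--     :param trace_events: Events found in the trace (filtered by family).
--     :param events: Event ids to accumulate
--     :return: Accumulated trace
--     """
--     accumulated = {}
--     for line in trace_events:
--         event = line[1]
--         if event in events:
--             if event in accumulated:
--                 accumulated[event] += 1
--             else:
--                 accumulated[event] = 1
--     return accumulated
-- ===== SOURCE B (Python) =====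
-- def __accumulate_events__(trace_events, events):
--     # Two-pass alternative: first record, in order of first appearance, which
--     # selected events occur; then count each by its own scan of the trace.
--     order = []
--     for line in trace_events:
--         ev = line[1]
--         if ev in events and ev not in order:
--             order.append(ev)
--     return {ev: sum(1 for line in trace_events if line[1] == ev) for ev in order}
-- ===== Notes on version B (the rewrite author's own statement) =====
-- stated objective: alternative
-- what changed: Instead of one pass maintaining a counting dict, B first collects the distinct selected events in order of first appearance and then counts each one by a separate scan of the trace.
import Mathlib
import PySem

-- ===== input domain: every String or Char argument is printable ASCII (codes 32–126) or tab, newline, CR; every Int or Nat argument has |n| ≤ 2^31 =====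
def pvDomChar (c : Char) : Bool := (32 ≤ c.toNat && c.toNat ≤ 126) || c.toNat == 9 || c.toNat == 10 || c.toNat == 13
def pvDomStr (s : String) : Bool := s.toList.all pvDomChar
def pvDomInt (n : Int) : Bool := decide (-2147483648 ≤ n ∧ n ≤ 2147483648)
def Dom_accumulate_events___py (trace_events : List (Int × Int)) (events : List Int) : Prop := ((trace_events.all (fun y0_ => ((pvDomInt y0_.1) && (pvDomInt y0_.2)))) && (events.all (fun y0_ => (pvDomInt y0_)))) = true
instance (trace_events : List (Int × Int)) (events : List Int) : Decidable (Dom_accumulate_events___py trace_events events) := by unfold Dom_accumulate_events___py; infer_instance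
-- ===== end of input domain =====

-- B re-implements A's single counting-dict pass as two passes (first-appearance
-- order of the selected events, then one counting scan per such event); alternative
-- decomposition, same exact result.

-- ===== PORT A =====
-- one pass over the trace, maintaining a counting dict
def accumulate_events___py (trace_events : List (Int × Int)) (events : List Int) : List (Int × Int) :=
  (trace_events.foldl (fun accumulated line =>
      let event := line.2
      if event ∈ events then
        if accumulated.contains event then
          -- 'accumulated[event] += 1': the key is present (guarded), so getD _ 0 is exact
          accumulated.insert event (accumulated.getD event 0 + 1)
        else
          accumulated.insert event 1
      else accumulated)
    (PySem.Dict.empty : PySem.Dict Int Int)).items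

-- ===== PORT B =====
-- pass 1: selected events in order of first appearance; pass 2: one counting scan per event.
-- 'order' is duplicate-free by construction, so the dict comprehension's items are exactly this map.
def accumulate_events___py_alt (trace_events : List (Int × Int)) (events : List Int) : List (Int × Int) :=
  let order := trace_events.foldl
    (fun s line => if line.2 ∈ events ∧ line.2 ∉ s then s ++ [line.2] else s) []
  order.map (fun ev =>
    (ev, trace_events.foldl (fun c line => if line.2 = ev then c + 1 else c) (0 : Int)))

-- ===== PRECONDITION & SPEC =====
def Spec_accumulate_events___py (trace_events : List (Int × Int)) (events : List Int) (out : List (Int × Int)) : Prop := out = accumulate_events___py_alt trace_events events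
instance (trace_events : List (Int × Int)) (events : List Int) (out : List (Int × Int)) : Decidable (Spec_accumulate_events___py trace_events events out) := by unfold Spec_accumulate_events___py; infer_instance

-- ===== CLAIM (what is proved, stated in full; the proofs are below) =====
def Claim_equal_accumulate_events___py : Prop := ∀ (trace_events : List (Int × Int)) (events : List Int), Dom_accumulate_events___py trace_events events → Spec_accumulate_events___py trace_events events (accumulate_events___py trace_events events)

-- ===== LEMMAS AND PROOFS =====

-- A's accumulating dict after processing l
def pvA (events : List Int) (l : List (Int × Int)) : PySem.Dict Int Int :=
  l.foldl (fun accumulated line =>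
      let event := line.2
      if event ∈ events then
        if accumulated.contains event then
          accumulated.insert event (accumulated.getD event 0 + 1)
        else
          accumulated.insert event 1
      else accumulated)
    (PySem.Dict.empty : PySem.Dict Int Int)

-- B's first-appearance order of selected events
def pvSeen (events : List Int) (l : List (Int × Int)) : List Int :=
  l.foldl (fun s line => if line.2 ∈ events ∧ line.2 ∉ s then s ++ [line.2] else s) []

-- B's per-event count
def pvCnt (l : List (Int × Int)) (ev : Int) : Int :=
  l.foldl (fun c line => if line.2 = ev then c + 1 else c) (0 : Int)

theorem pvSeen_snoc (events : List Int) (l : List (Int × Int)) (x : Int × Int) :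
    pvSeen events (l ++ [x]) =
      if x.2 ∈ events ∧ x.2 ∉ pvSeen events l then pvSeen events l ++ [x.2] else pvSeen events l := by
  simp [pvSeen, List.foldl_append]

theorem pvCnt_snoc (l : List (Int × Int)) (x : Int × Int) (ev : Int) :
    pvCnt (l ++ [x]) ev = if x.2 = ev then pvCnt l ev + 1 else pvCnt l ev := by
  simp [pvCnt, List.foldl_append]

theorem pvA_snoc (events : List Int) (l : List (Int × Int)) (x : Int × Int) :
    pvA events (l ++ [x]) =
      if x.2 ∈ events then
        if (pvA events l).contains x.2 then
          (pvA events l).insert x.2 ((pvA events l).getD x.2 0 + 1)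
        else (pvA events l).insert x.2 1
      else pvA events l := by
  simp [pvA, List.foldl_append]

theorem pvSeen_mem (events : List Int) (l : List (Int × Int)) (ev : Int) :
    ev ∈ pvSeen events l ↔ ev ∈ events ∧ ∃ p ∈ l, p.2 = ev := by
  induction l using List.reverseRecOn with
  | nil => simp [pvSeen]
  | append_singleton l x ih =>
      rw [pvSeen_snoc]
      by_cases hc : x.2 ∈ events ∧ x.2 ∉ pvSeen events l
      · simp only [if_pos hc, List.mem_append, List.mem_singleton, ih]
        constructor
        · rintro (⟨he, p, hp, hpe⟩ | rfl)
          · exact ⟨he, p, Or.inl hp, hpe⟩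
          · exact ⟨hc.1, x, Or.inr rfl, rfl⟩
        · rintro ⟨he, p, (hp | rfl), hpe⟩
          · exact Or.inl ⟨he, p, hp, hpe⟩
          · exact Or.inr hpe.symm
      · simp only [if_neg hc, ih]
        constructor
        · rintro ⟨he, p, hp, hpe⟩
          exact ⟨he, p, by simp [hp], hpe⟩
        · rintro ⟨he, p, hp, hpe⟩
          rcases List.mem_append.mp hp with hp | hp
          · exact ⟨he, p, hp, hpe⟩
          · have hxe : x.2 = ev := (List.mem_singleton.mp hp) ▸ hpe
            have hin : ev ∈ pvSeen events l := by
              by_contra hnot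
              apply hc
              rw [hxe]
              exact ⟨he, hnot⟩
            exact ⟨he, (ih.mp hin).2⟩

theorem pvSeen_nodup (events : List Int) (l : List (Int × Int)) :
    (pvSeen events l).Nodup := by
  induction l using List.reverseRecOn with
  | nil => simp [pvSeen]
  | append_singleton l x ih =>
      rw [pvSeen_snoc]
      split_ifs with hc
      · exact List.Nodup.append ih (List.nodup_singleton _) (by
          intro a ha hb
          rcases List.mem_singleton.mp hb with rfl
          exact hc.2 ha)
      · exact ih

theorem pvCnt_zero (l : List (Int × Int)) (ev : Int) (h : ∀ p ∈ l, p.2 ≠ ev) :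
    pvCnt l ev = 0 := by
  induction l using List.reverseRecOn with
  | nil => simp [pvCnt]
  | append_singleton l x ih =>
      rw [pvCnt_snoc, if_neg (h x (by simp))]
      exact ih fun p hp => h p (by simp [hp])

theorem pvA_items (events : List Int) (l : List (Int × Int)) :
    (pvA events l).items = (pvSeen events l).map (fun ev => (ev, pvCnt l ev)) := by
  induction l using List.reverseRecOn with
  | nil => simp [pvA, pvSeen, PySem.Dict.empty]
  | append_singleton l x ih =>
      have hkeys : (pvA events l).keys = pvSeen events l := by
        simp only [PySem.Dict.keys, ih, List.map_map, Function.comp_def]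
        simp
      have hnd : (pvA events l).keys.Nodup := by rw [hkeys]; exact pvSeen_nodup events l
      have hcont : (pvA events l).contains x.2 = decide (x.2 ∈ pvSeen events l) := by
        rw [PySem.Dict.contains_eq_decide_mem_keys, hkeys]
      rw [pvA_snoc, pvSeen_snoc]
      by_cases he : x.2 ∈ events
      · rw [if_pos he]
        by_cases hs : x.2 ∈ pvSeen events l
        · have hc : (pvA events l).contains x.2 = true := by rw [hcont]; simpa
          rw [if_pos hc, if_neg (by simp [hs])]
          have hmem : (x.2, pvCnt l x.2) ∈ (pvA events l).items := by
            rw [ih]; exact List.mem_map.mpr ⟨x.2, hs, rfl⟩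
          have hgetD : (pvA events l).getD x.2 0 = pvCnt l x.2 :=
            PySem.Dict.getD_of_mem_items _ hmem hnd 0
          rw [PySem.Dict.items_insert_of_contains _ _ hc, ih, hgetD, List.map_map]
          apply List.map_congr_left
          intro ev _
          by_cases hev : ev = x.2
          · subst hev
            simp [pvCnt_snoc]
          · have h2 : x.2 ≠ ev := fun h => hev h.symm
            simp [pvCnt_snoc, hev, h2]
        · have hc : (pvA events l).contains x.2 = false := by rw [hcont]; simpa
          rw [if_neg (by simp [hc]), if_pos ⟨he, hs⟩]
          have hnew : pvCnt (l ++ [x]) x.2 = 1 := by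
            rw [pvCnt_snoc, if_pos rfl, pvCnt_zero]
            · ring
            · intro p hp hpe
              exact hs ((pvSeen_mem events l x.2).mpr ⟨he, p, hp, hpe⟩)
          rw [PySem.Dict.items_insert_of_not_contains _ _ hc, ih, List.map_append]
          congr 1
          · apply List.map_congr_left
            intro ev hev
            have : ev ≠ x.2 := fun h => hs (h ▸ hev)
            have h2 : x.2 ≠ ev := fun h => this h.symm
            simp [pvCnt_snoc, h2]
          · simp [hnew]
      · rw [if_neg he, if_neg (by simp [he]), ih]
        apply List.map_congr_left
        intro ev hev
        have hevents : ev ∈ events := ((pvSeen_mem events l ev).mp hev).1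
        have : x.2 ≠ ev := fun h => he (h ▸ hevents)
        simp [pvCnt_snoc, this]

-- ===== VERDICT (by name: the statement is the Claim_ definition above) =====
theorem accumulate_events___py_spec : Claim_equal_accumulate_events___py := by
  intro trace_events events _
  unfold Spec_accumulate_events___py
  show (pvA events trace_events).items =
    (pvSeen events trace_events).map (fun ev => (ev, pvCnt trace_events ev))
  exact pvA_items events trace_events
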